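-- pv_equiv track=rewrite | github.com/cagdasatici/price_comparison | utils/price_utils.py | validate_price
-- ===== SOURCE A (Python) =====
-- def validate_price(price, product):
--     """Validate if a price is within reasonable ranges for different product types."""
--     if price is None:
--         return False
--
--     # Define price ranges for different product types
--     price_ranges = {
--         'console': {
--             'ps5': (350, 800),  # PS5 specific range
--             'xbox': (350, 800),  # Xbox specific range
--             'switch': (250, 500),  # Nintendo Switch specific range
--             'default': (100, 1000)  # Default console range
--         },
--         'game': (10, 100),       # Video games
--         'accessory': (5, 200)    # Gaming accessories
--     }
--
--     # Determine product type based on keywords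
--     product_lower = product.lower()
--
--     # Check for specific console types
--     if 'ps5' in product_lower or 'playstation 5' in product_lower:
--         min_price, max_price = price_ranges['console']['ps5']
--     elif 'xbox' in product_lower:
--         min_price, max_price = price_ranges['console']['xbox']
--     elif 'switch' in product_lower or 'nintendo' in product_lower:
--         min_price, max_price = price_ranges['console']['switch']
--     elif any(keyword in product_lower for keyword in ['console', 'playstation', 'nintendo']):
--         min_price, max_price = price_ranges['console']['default']
--     elif any(keyword in product_lower for keyword in ['game', 'spel', 'software']):
--         min_price, max_price = price_ranges['game']
--     else:
--         min_price, max_price = price_ranges['accessory']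
--
--     # Check if price is within the valid range for the product type
--     return min_price <= price <= max_price
-- ===== SOURCE B (Python) =====
-- # Instead of an ordered first-match cascade, map every keyword to the priority of
-- # the branch where it first takes effect, collect the priorities of ALL keywords
-- # occurring in the product, and take their minimum; the minimum priority selects
-- # the price range.  Correct because a keyword shared by several branches only
-- # ever fires at its earliest branch, so min over the matched set equals the
-- # if/elif first-match priority.
--
-- _KEYWORD_PRIO = {
--     'ps5': 0, 'playstation 5': 0,
--     'xbox': 1,
--     'switch': 2, 'nintendo': 2,
--     'console': 3, 'playstation': 3,
--     'game': 4, 'spel': 4, 'software': 4,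
-- }
--
-- _RANGES = {
--     0: (350, 800),
--     1: (350, 800),
--     2: (250, 500),
--     3: (100, 1000),
--     4: (10, 100),
--     5: (5, 200),
-- }
--
-- def validate_price(price, product):
--     if price is None:
--         return False
--     product_lower = product.lower()
--     prio = min((p for k, p in _KEYWORD_PRIO.items() if k in product_lower), default=5)
--     lo, hi = _RANGES[prio]
--     return lo <= price <= hi
-- ===== Notes on version B (the rewrite author's own statement) =====
-- stated objective: alternative
-- what changed: Replaces the ordered if/elif first-match cascade by an unordered aggregation: every keyword is tagged with the priority of its earliest branch, the minimum priority over all keywords found in the product is taken, and that number indexes the range table.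
import Mathlib
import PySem

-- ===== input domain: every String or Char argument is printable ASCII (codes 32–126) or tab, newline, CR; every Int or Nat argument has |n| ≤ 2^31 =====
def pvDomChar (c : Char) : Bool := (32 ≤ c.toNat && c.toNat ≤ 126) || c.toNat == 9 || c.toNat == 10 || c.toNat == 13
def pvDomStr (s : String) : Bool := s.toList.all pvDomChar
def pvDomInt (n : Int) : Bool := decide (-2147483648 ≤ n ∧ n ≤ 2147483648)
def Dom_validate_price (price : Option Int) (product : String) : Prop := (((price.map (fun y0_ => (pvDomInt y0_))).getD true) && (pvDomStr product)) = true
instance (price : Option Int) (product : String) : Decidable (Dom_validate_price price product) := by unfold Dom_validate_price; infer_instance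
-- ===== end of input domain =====

-- B replaces A's ordered if/elif first-match cascade by an unordered aggregation:
-- each keyword carries the priority of its earliest branch, and the MINIMUM priority
-- over all keywords found in the product indexes a range table (alternative, same cost).

-- ===== PORT A =====
def validate_price (price : Option Int) (product : String) : Bool :=
  match price with
  | none => false
  | some p =>
    let product_lower := PySem.Str.lower product
    let mm : Int × Int :=
      if PySem.Str.isIn "ps5" product_lower || PySem.Str.isIn "playstation 5" product_lower then
        (350, 800)
      else if PySem.Str.isIn "xbox" product_lower then
        (350, 800)
      else if PySem.Str.isIn "switch" product_lower || PySem.Str.isIn "nintendo" product_lower then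
        (250, 500)
      else if ["console", "playstation", "nintendo"].any (fun keyword => PySem.Str.isIn keyword product_lower) then
        (100, 1000)
      else if ["game", "spel", "software"].any (fun keyword => PySem.Str.isIn keyword product_lower) then
        (10, 100)
      else
        (5, 200)
    decide (mm.1 ≤ p ∧ p ≤ mm.2)

-- ===== PORT B =====
def pvKeywordPrio : List (String × Nat) :=
  [ ("ps5", 0), ("playstation 5", 0)
  , ("xbox", 1)
  , ("switch", 2), ("nintendo", 2)
  , ("console", 3), ("playstation", 3)
  , ("game", 4), ("spel", 4), ("software", 4) ]

def pvRanges : List (Nat × (Int × Int)) :=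
  [ (0, (350, 800)), (1, (350, 800)), (2, (250, 500))
  , (3, (100, 1000)), (4, (10, 100)), (5, (5, 200)) ]

def validate_price_alt (price : Option Int) (product : String) : Bool :=
  match price with
  | none => false
  | some p =>
    let product_lower := PySem.Str.lower product
    -- min((p for k, p in _KEYWORD_PRIO.items() if k in product_lower), default=5)
    let prio : Nat :=
      (pvKeywordPrio.filterMap (fun kp =>
        if PySem.Str.isIn kp.1 product_lower then some kp.2 else none)).foldl min 5
    -- _RANGES[prio]; the key is always present (prio ∈ 0..5), so the default is never reached
    let mm : Int × Int := ((pvRanges.find? (fun r => r.1 == prio)).map (·.2)).getD (5, 200)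
    decide (mm.1 ≤ p ∧ p ≤ mm.2)

-- ===== PRECONDITION & SPEC =====
def Spec_validate_price (price : Option Int) (product : String) (out : Bool) : Prop := out = validate_price_alt price product
instance (price : Option Int) (product : String) (out : Bool) : Decidable (Spec_validate_price price product out) := by unfold Spec_validate_price; infer_instance

-- ===== CLAIM =====
def Claim_equal_validate_price : Prop := ∀ (price : Option Int) (product : String), Dom_validate_price price product → Spec_validate_price price product (validate_price price product)

-- ===== LEMMAS AND PROOFS =====
-- A's selected (min, max) pair equals B's: generalize the ten substring tests to
-- Booleans and check all 1024 assignments by kernel evaluation.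
set_option maxHeartbeats 1000000 in
theorem pv_mm_eq (pl : String) :
  (if PySem.Str.isIn "ps5" pl || PySem.Str.isIn "playstation 5" pl then ((350:Int),(800:Int))
   else if PySem.Str.isIn "xbox" pl then (350,800)
   else if PySem.Str.isIn "switch" pl || PySem.Str.isIn "nintendo" pl then (250,500)
   else if ["console","playstation","nintendo"].any (fun k => PySem.Str.isIn k pl) then (100,1000)
   else if ["game","spel","software"].any (fun k => PySem.Str.isIn k pl) then (10,100)
   else (5,200))
  = ((pvRanges.find? (fun r => r.1 == (pvKeywordPrio.filterMap (fun kp => if PySem.Str.isIn kp.1 pl then some kp.2 else none)).foldl min 5)).map (·.2)).getD (5,200) := by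
  simp only [pvKeywordPrio, List.filterMap_cons, List.filterMap_nil, List.any_cons, List.any_nil, Bool.or_false]
  generalize PySem.Str.isIn "playstation 5" pl = b2
  generalize PySem.Str.isIn "ps5" pl = b1
  generalize PySem.Str.isIn "xbox" pl = b3
  generalize PySem.Str.isIn "switch" pl = b4
  generalize PySem.Str.isIn "nintendo" pl = b5
  generalize PySem.Str.isIn "console" pl = b6
  generalize PySem.Str.isIn "playstation" pl = b7
  generalize PySem.Str.isIn "game" pl = b8
  generalize PySem.Str.isIn "spel" pl = b9
  generalize PySem.Str.isIn "software" pl = b10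
  revert b1 b2 b3 b4 b5 b6 b7 b8 b9 b10
  decide

-- ===== VERDICT =====
theorem validate_price_spec : Claim_equal_validate_price := by
  intro price product _
  unfold Spec_validate_price
  cases price with
  | none => rfl
  | some p =>
    simp only [validate_price, validate_price_alt]
    rw [pv_mm_eq (PySem.Str.lower product)]
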